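-- pv_equiv track=rewrite | github.com/AlexeiFerreiraCareem/enspire | floorplan_chairs_counter.py | bfs
-- ===== SOURCE A (Python) =====
-- from collections import deque
--
-- def bfs(start, floor_plan, visited):
--     queue = deque([start])
--     chairs = {'W': 0, 'P': 0, 'S': 0, 'C': 0}
--
--     while queue:
--         x, y = queue.popleft()
--         # Check all four directions
--         for dx, dy in [(0, 1), (1, 0), (0, -1), (-1, 0)]:
--             nx, ny = x + dx, y + dy
--             if 0 <= nx < len(floor_plan) and 0 <= ny < len(floor_plan[0]) and (nx, ny) not in visited:
--                 if floor_plan[nx][ny] in " WPCS":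
--                     visited.add((nx, ny))
--                     if floor_plan[nx][ny] in "WPCS":
--                         chairs[floor_plan[nx][ny]] += 1
--                     queue.append((nx, ny))
--     return chairs
-- ===== SOURCE B (Python) =====
-- def bfs(start, floor_plan, visited):
--     # Worklist-free saturation: enumerate the enterable unvisited cells once, then
--     # repeatedly add every candidate adjacent to start or the current region until
--     # nothing changes; count the chairs over the finished region.
--     # Mutates `visited` like the original (adds exactly the flooded cells).
--     rows = len(floor_plan)
--     cols = len(floor_plan[0]) if floor_plan else 0
--     dirs = ((0, 1), (1, 0), (0, -1), (-1, 0))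
--     cells = [(i, j) for i in range(rows) for j in range(cols)
--              if (i, j) not in visited and floor_plan[i][j] in " WPCS"]
--     region = set()
--     while True:
--         grown = [p for p in cells
--                  if p not in region
--                  and any((p[0] + dx, p[1] + dy) == start
--                          or (p[0] + dx, p[1] + dy) in region
--                          for dx, dy in dirs)]
--         if not grown:
--             break
--         region.update(grown)
--     visited.update(region)
--     return {c: sum(1 for (i, j) in region if floor_plan[i][j] == c) for c in "WPSC"}
-- ===== Notes on version B (the rewrite author's own statement) =====
-- stated objective: alternative
-- what changed: Replaces the deque-based BFS with incremental dict counting by a worklist-free fixpoint saturation: the enterable unvisited cells are enumerated once, the region is grown by whole passes until no pass adds a cell, and the chairs are counted in one scan afterwards.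
-- outside the precondition, e.g. on bfs((0, 1), [['X'], []], set()): A returns {'W': 0, 'P': 0, 'S': 0, 'C': 0}, B raises IndexError
import Mathlib
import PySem

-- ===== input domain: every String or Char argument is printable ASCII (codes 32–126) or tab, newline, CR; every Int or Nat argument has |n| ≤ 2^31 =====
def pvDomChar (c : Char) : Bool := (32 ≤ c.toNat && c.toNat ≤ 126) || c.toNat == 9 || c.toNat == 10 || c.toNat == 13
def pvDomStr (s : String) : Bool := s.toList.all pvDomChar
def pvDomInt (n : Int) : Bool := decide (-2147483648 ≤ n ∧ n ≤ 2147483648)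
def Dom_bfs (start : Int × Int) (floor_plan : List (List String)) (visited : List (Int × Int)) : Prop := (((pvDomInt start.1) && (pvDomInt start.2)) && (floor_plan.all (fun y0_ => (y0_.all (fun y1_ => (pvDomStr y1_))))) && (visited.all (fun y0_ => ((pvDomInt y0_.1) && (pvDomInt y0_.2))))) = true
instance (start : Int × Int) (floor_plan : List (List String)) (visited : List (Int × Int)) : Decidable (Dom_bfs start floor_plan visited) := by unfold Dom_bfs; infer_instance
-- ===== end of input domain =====

-- B replaces A's FIFO worklist + incremental dict counting by a worklist-free fixpoint
-- saturation: the enterable unvisited cells are enumerated once, the region is grown by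
-- whole passes until a pass adds nothing, and the chairs are counted in one scan afterwards
-- (alternative algorithm; same result because the flooded region is the least fixed point
-- regardless of the order in which it is discovered).
-- Side effect: like A, the Python B mutates `visited` in place (adds exactly the flooded
-- cells); the equivalence proved here is about the return value.


-- shared subscript helper: floor_plan[nx][ny]; total via defaults (Pre_ excludes the inputs
-- where the Python subscript would raise)
def cellAt (fp : List (List String)) (nx ny : Int) : String :=
  PySem.List.pyGetD (PySem.List.pyGetD fp nx []) ny ""

-- termination-measure helper for A's loop: number of in-grid cells not yet visited
def freeCount (rows cols : Int) (visited : List (Int × Int)) : Nat :=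
  (((Finset.range rows.toNat) ×ˢ (Finset.range cols.toNat)).filter
    (fun p => ((p.1 : Int), (p.2 : Int)) ∉ visited)).card

lemma freeCount_add_lt (rows cols : Int) (v : List (Int × Int)) (p : Int × Int)
    (h1 : 0 ≤ p.1) (h2 : p.1 < rows) (h3 : 0 ≤ p.2) (h4 : p.2 < cols) (hp : p ∉ v) :
    freeCount rows cols (PySem.Set.add v p) < freeCount rows cols v := by
  unfold freeCount
  rw [PySem.Set.add_of_not_mem hp]
  apply Finset.card_lt_card
  have hcast : ((p.1.toNat : Int), (p.2.toNat : Int)) = p := by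
    obtain ⟨a, b⟩ := p
    simp only [Prod.mk.injEq]
    exact ⟨Int.toNat_of_nonneg h1, Int.toNat_of_nonneg h3⟩
  constructor
  · intro q hq
    simp only [Finset.mem_filter, List.mem_append] at hq ⊢
    exact ⟨hq.1, fun h => hq.2 (Or.inl h)⟩
  · intro hsub
    have hpmem : (p.1.toNat, p.2.toNat) ∈ ((Finset.range rows.toNat) ×ˢ (Finset.range cols.toNat)).filter
        (fun q => ((q.1 : Int), (q.2 : Int)) ∉ v) := by
      simp only [Finset.mem_filter, Finset.mem_product, Finset.mem_range, hcast]
      refine ⟨⟨?_, ?_⟩, hp⟩ <;> omega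
    have := hsub hpmem
    rw [Finset.mem_filter] at this
    apply this.2
    rw [hcast]
    simp

-- ===== PORT A =====
-- one iteration of A's inner `for dx, dy in [...]` over the state (queue, chairs, visited)
def bfsStepA (fp : List (List String)) (x y : Int)
    (st : List (Int × Int) × PySem.Dict String Int × List (Int × Int))
    (d : Int × Int) : List (Int × Int) × PySem.Dict String Int × List (Int × Int) :=
  let nx := x + d.1
  let ny := y + d.2
  if 0 ≤ nx ∧ nx < (fp.length : Int) ∧ 0 ≤ ny ∧ ny < ((fp.headD []).length : Int) ∧ (nx, ny) ∉ st.2.2 then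
    let cell := cellAt fp nx ny
    if PySem.Str.isIn cell " WPCS" = true then
      -- chairs[cell] += 1 : overwrite-insert on the existing key (Pre_ excludes the KeyError cells)
      (st.1 ++ [(nx, ny)],
       if PySem.Str.isIn cell "WPCS" = true then st.2.1.insert cell (st.2.1.getD cell 0 + 1) else st.2.1,
       PySem.Set.add st.2.2 (nx, ny))
    else st
  else st

lemma foldA_measure (fp : List (List String)) (x y : Int) :
    ∀ (ds q : List (Int × Int)) (ch : PySem.Dict String Int) (v : List (Int × Int)),
    freeCount fp.length (fp.headD []).length ((ds.foldl (bfsStepA fp x y) (q, ch, v)).2.2)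
      + ((ds.foldl (bfsStepA fp x y) (q, ch, v)).1).length
    ≤ freeCount fp.length (fp.headD []).length v + q.length := by
  intro ds
  induction ds with
  | nil => intro q ch v; simp
  | cons d ds ih =>
    intro q ch v
    simp only [List.foldl_cons]
    by_cases hg : 0 ≤ x + d.1 ∧ x + d.1 < (fp.length : Int) ∧ 0 ≤ y + d.2 ∧ y + d.2 < ((fp.headD []).length : Int) ∧ (x + d.1, y + d.2) ∉ v
    · by_cases hc : PySem.Str.isIn (cellAt fp (x + d.1) (y + d.2)) " WPCS" = true
      · have hstep : bfsStepA fp x y (q, ch, v) d =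
            (q ++ [(x + d.1, y + d.2)],
             if PySem.Str.isIn (cellAt fp (x + d.1) (y + d.2)) "WPCS" = true then ch.insert (cellAt fp (x + d.1) (y + d.2)) (ch.getD (cellAt fp (x + d.1) (y + d.2)) 0 + 1) else ch,
             PySem.Set.add v (x + d.1, y + d.2)) := by
          simp only [bfsStepA, if_pos hg, if_pos hc]
        rw [hstep]
        refine le_trans (ih _ _ _) ?_
        have := freeCount_add_lt (fp.length : Int) ((fp.headD []).length : Int) v (x + d.1, y + d.2) hg.1 hg.2.1 hg.2.2.1 hg.2.2.2.1 hg.2.2.2.2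
        simp only [List.length_append, List.length_cons, List.length_nil]
        omega
      · have hstep : bfsStepA fp x y (q, ch, v) d = (q, ch, v) := by
          simp only [bfsStepA, if_pos hg, if_neg hc]
        rw [hstep]; exact ih _ _ _
    · have hstep : bfsStepA fp x y (q, ch, v) d = (q, ch, v) := by
        simp only [bfsStepA, if_neg hg]
      rw [hstep]; exact ih _ _ _

-- A's `while queue:` loop; threads (queue, chairs, visited), returns the final (chairs, visited)
def bfsLoopA (fp : List (List String)) (queue : List (Int × Int))
    (chairs : PySem.Dict String Int) (visited : List (Int × Int)) :
    PySem.Dict String Int × List (Int × Int) :=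
  match queue with
  | [] => (chairs, visited)
  | (x, y) :: rest =>
      let st := ([((0:Int),(1:Int)), (1,0), (0,-1), (-1,0)]).foldl (bfsStepA fp x y) (rest, chairs, visited)
      bfsLoopA fp st.1 st.2.1 st.2.2
termination_by freeCount fp.length (fp.headD []).length visited + queue.length
decreasing_by
  have h := foldA_measure fp x y [((0:Int),(1:Int)), (1,0), (0,-1), (-1,0)] rest chairs visited
  simp only [List.length_cons]
  omega

def bfs (start : Int × Int) (floor_plan : List (List String)) (visited : List (Int × Int)) : List (String × Int) :=
  let chairs : PySem.Dict String Int := PySem.Dict.ofList [("W", 0), ("P", 0), ("S", 0), ("C", 0)]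
  (bfsLoopA floor_plan [start] chairs visited).1.items

-- ===== PORT B =====
-- Source B: worklist-free saturation.  `dirs4` is Source B's tuple of neighbour offsets.
def dirs4 : List (Int × Int) := [(0, 1), (1, 0), (0, -1), (-1, 0)]

-- the comprehension `[(i, j) for i in range(rows) for j in range(cols) if … ]`
def cellsB (fp : List (List String)) (visited : List (Int × Int)) (rows cols : Int) : List (Int × Int) :=
  (PySem.List.pyRange 0 rows 1).flatMap (fun i =>
    ((PySem.List.pyRange 0 cols 1).filter (fun j =>
        decide ((i, j) ∉ visited) && PySem.Str.isIn (cellAt fp i j) " WPCS")).map (fun j => (i, j)))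

-- one pass: `grown = [p for p in cells if p not in region and any(… == start or … in region)]`
def growB (start : Int × Int) (cells region : List (Int × Int)) : List (Int × Int) :=
  cells.filter (fun p => decide (p ∉ region) &&
    dirs4.any (fun d => ((p.1 + d.1, p.2 + d.2) == start) || decide ((p.1 + d.1, p.2 + d.2) ∈ region)))

-- termination helper for satB: a productive pass strictly shrinks the unabsorbed cells
lemma countP_lt_of_mem {α : Type} (P P' : α → Bool) (hmono : ∀ x, P' x = true → P x = true) :
    ∀ (l : List α) (g : α), g ∈ l → P g = true → P' g = false → l.countP P' < l.countP P := by
  intro l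
  induction l with
  | nil => intro g hg; simp at hg
  | cons a t ih =>
    intro g hg hP hP'
    have hmono' := List.countP_mono_left (l := t) (p := P') (q := P) (fun x _ => hmono x)
    rcases List.mem_cons.mp hg with rfl | hg
    · rw [List.countP_cons, List.countP_cons, hP, hP']
      simp only [if_true]
      have : (if (false = true) then 1 else 0) = 0 := by simp
      rw [this]
      omega
    · rw [List.countP_cons, List.countP_cons]
      have := ih g hg hP hP'
      have hif : (if P' a = true then 1 else 0) ≤ (if P a = true then 1 else 0) := by
        by_cases h : P' a = true
        · rw [if_pos h, if_pos (hmono a h)]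
        · rw [if_neg h]
          split_ifs <;> omega
      omega

lemma satB_dec (start : Int × Int) (cells region : List (Int × Int))
    (h : growB start cells region ≠ []) :
    cells.countP (fun p => decide (p ∉ PySem.Set.update region (growB start cells region)))
      < cells.countP (fun p => decide (p ∉ region)) := by
  obtain ⟨g, hg⟩ := List.exists_mem_of_ne_nil _ h
  have hgc := List.mem_filter.mp hg
  have hmono : ∀ x : Int × Int,
      decide (x ∉ PySem.Set.update region (growB start cells region)) = true →
      decide (x ∉ region) = true := by
    intro x hx
    simp only [decide_eq_true_eq] at hx ⊢
    exact fun hmem => hx ((PySem.Set.mem_update _ _ _).mpr (Or.inl hmem))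
  have hP : decide (g ∉ region) = true := by
    have h2 := hgc.2
    simp only [Bool.and_eq_true] at h2
    exact h2.1
  have hP' : decide (g ∉ PySem.Set.update region (growB start cells region)) = false := by
    simp only [decide_eq_false_iff_not, not_not]
    exact (PySem.Set.mem_update _ _ _).mpr (Or.inr hg)
  exact countP_lt_of_mem _ _ hmono cells g hgc.1 hP hP'

-- Source B's `while True:` saturation loop (region.update(grown) is Set.update)
def satB (start : Int × Int) (cells region : List (Int × Int)) : List (Int × Int) :=
  let grown := growB start cells region
  if grown = [] then region
  else satB start cells (PySem.Set.update region grown)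
termination_by cells.countP (fun p => decide (p ∉ region))
decreasing_by
  exact satB_dec start cells region (by assumption)

def bfs_alt (start : Int × Int) (floor_plan : List (List String)) (visited : List (Int × Int)) : List (String × Int) :=
  let rows : Int := floor_plan.length
  let cols : Int := if floor_plan.isEmpty then 0 else ((floor_plan.headD []).length : Int)
  let region := satB start (cellsB floor_plan visited rows cols) []
  (["W", "P", "S", "C"] : List String).map
    (fun c => (c, (region.countP (fun p => cellAt floor_plan p.1 p.2 == c) : Int)))

-- ===== PRECONDITION & SPEC =====
-- Pre_ excludes exactly the grid shapes that can make A raise: a row shorter than row 0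
-- (IndexError when the fill reaches it) and cells that are multi-character or empty
-- substrings of "WPCS" (KeyError when the fill touches them); since reachability is not a
-- closed form, such grids are excluded even when the bad cell is unreachable and A returns.
def Pre_bfs (start : Int × Int) (floor_plan : List (List String)) (visited : List (Int × Int)) : Prop :=
  (∀ r ∈ floor_plan, (floor_plan.headD []).length ≤ r.length) ∧
  (∀ r ∈ floor_plan, ∀ c ∈ r.take (floor_plan.headD []).length,
    c ∉ (["", "WP", "PC", "CS", "WPC", "PCS", "WPCS"] : List String))
instance (start : Int × Int) (floor_plan : List (List String)) (visited : List (Int × Int)) : Decidable (Pre_bfs start floor_plan visited) := by unfold Pre_bfs; infer_instance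

def pvWitness_bfs : (Int × Int) × List (List String) × (List (Int × Int)) :=
  ((0, 0), [[" ", "W"], ["P", "C"]], [])

def Spec_bfs (start : Int × Int) (floor_plan : List (List String)) (visited : List (Int × Int)) (out : List (String × Int)) : Prop := out = bfs_alt start floor_plan visited
instance (start : Int × Int) (floor_plan : List (List String)) (visited : List (Int × Int)) (out : List (String × Int)) : Decidable (Spec_bfs start floor_plan visited out) := by unfold Spec_bfs; infer_instance

-- ===== CLAIM (what is proved, stated in full; the proofs are below) =====
def Claim_equal_bfs : Prop := ∀ (start : Int × Int) (floor_plan : List (List String)) (visited : List (Int × Int)), Dom_bfs start floor_plan visited → Pre_bfs start floor_plan visited → Spec_bfs start floor_plan visited (bfs start floor_plan visited)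

-- ===== LEMMAS AND PROOFS =====

-- the four-neighbour relation and the "enterable cell" predicate
def Adj (p q : Int × Int) : Prop :=
  ∃ d ∈ ([((0:Int),(1:Int)), (1,0), (0,-1), (-1,0)] : List (Int × Int)), q = (p.1 + d.1, p.2 + d.2)

def Ok (fp : List (List String)) (q : Int × Int) : Prop :=
  0 ≤ q.1 ∧ q.1 < (fp.length : Int) ∧ 0 ≤ q.2 ∧ q.2 < ((fp.headD []).length : Int) ∧
  PySem.Str.isIn (cellAt fp q.1 q.2) " WPCS" = true

-- cells both fills add: reachable from `start` through enterable unvisited cells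
inductive Reach (fp : List (List String)) (start : Int × Int) (V0 : List (Int × Int)) : (Int × Int) → Prop
  | base {q} : Adj start q → Ok fp q → q ∉ V0 → Reach fp start V0 q
  | step {p q} : Reach fp start V0 p → Adj p q → Ok fp q → q ∉ V0 → Reach fp start V0 q

def countsList (fp : List (List String)) (L : List (Int × Int)) : List (String × Int) :=
  (["W", "P", "S", "C"] : List String).map
    (fun c => (c, (L.countP (fun p => cellAt fp p.1 p.2 == c) : Int)))

def countsDict (fp : List (List String)) (L : List (Int × Int)) : PySem.Dict String Int :=
  ⟨countsList fp L⟩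

lemma infix_WPCS (l : List Char) (h : l <:+: ['W', 'P', 'C', 'S']) :
    l = [] ∨ l = ['W'] ∨ l = ['P'] ∨ l = ['C'] ∨ l = ['S'] ∨ l = ['W','P'] ∨ l = ['P','C'] ∨
      l = ['C','S'] ∨ l = ['W','P','C'] ∨ l = ['P','C','S'] ∨ l = ['W','P','C','S'] := by
  obtain ⟨t, hp, hs⟩ := List.infix_iff_prefix_suffix.mp h
  rw [← List.mem_tails] at hs
  simp [List.tails] at hs
  rcases hs with rfl | rfl | rfl | rfl | rfl <;>
    (rw [← List.mem_inits] at hp; simp [List.inits] at hp; tauto)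

lemma toList_eq_string (c s : String) (h : c.toList = s.toList) : c = s := String.toList_inj.mp h

lemma chair_cases (c : String) (hin : PySem.Str.isIn c "WPCS" = true)
    (hnb : c ∉ (["", "WP", "PC", "CS", "WPC", "PCS", "WPCS"] : List String)) :
    c = "W" ∨ c = "P" ∨ c = "C" ∨ c = "S" := by
  have hinf : c.toList <:+: ['W', 'P', 'C', 'S'] := by
    have h2 : PySem.Chars.isIn c.toList "WPCS".toList = true := by simpa using hin
    exact (PySem.Chars.isIn_iff_infix _ _).mp h2
  rcases infix_WPCS _ hinf with h|h|h|h|h|h|h|h|h|h|h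
  · rw [toList_eq_string c "" (by rw [h]; decide)] at hnb; simp at hnb
  · exact Or.inl (toList_eq_string c "W" (by rw [h]; decide))
  · exact Or.inr (Or.inl (toList_eq_string c "P" (by rw [h]; decide)))
  · exact Or.inr (Or.inr (Or.inl (toList_eq_string c "C" (by rw [h]; decide))))
  · exact Or.inr (Or.inr (Or.inr (toList_eq_string c "S" (by rw [h]; decide))))
  · rw [toList_eq_string c "WP" (by rw [h]; decide)] at hnb; simp at hnb
  · rw [toList_eq_string c "PC" (by rw [h]; decide)] at hnb; simp at hnb
  · rw [toList_eq_string c "CS" (by rw [h]; decide)] at hnb; simp at hnb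
  · rw [toList_eq_string c "WPC" (by rw [h]; decide)] at hnb; simp at hnb
  · rw [toList_eq_string c "PCS" (by rw [h]; decide)] at hnb; simp at hnb
  · rw [toList_eq_string c "WPCS" (by rw [h]; decide)] at hnb; simp at hnb

lemma cellAt_mem_take (fp : List (List String)) (nx ny : Int)
    (h1 : 0 ≤ nx) (h2 : nx < (fp.length : Int)) (h3 : 0 ≤ ny) (h4 : ny < ((fp.headD []).length : Int))
    (hlen : ∀ r ∈ fp, (fp.headD []).length ≤ r.length) :
    ∃ r ∈ fp, cellAt fp nx ny ∈ r.take (fp.headD []).length := by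
  have hnx : nx.toNat < fp.length := by omega
  have hrow : PySem.List.pyGetD fp nx ([] : List String) = fp[nx.toNat]'hnx :=
    PySem.List.pyGetD_eq_getElem fp ([] : List String) h1 h2
  refine ⟨fp[nx.toNat]'hnx, List.getElem_mem _, ?_⟩
  have hrlen : (fp.headD []).length ≤ (fp[nx.toNat]'hnx).length := hlen _ (List.getElem_mem _)
  have hny : ny.toNat < (fp.headD []).length := by omega
  have hny2 : ny.toNat < (fp[nx.toNat]'hnx).length := by omega
  have hcell : cellAt fp nx ny = (fp[nx.toNat]'hnx)[ny.toNat]'hny2 := by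
    unfold cellAt
    rw [hrow]
    exact PySem.List.pyGetD_eq_getElem _ "" h3 (by push_cast; omega)
  rw [hcell]
  have hkk : ny.toNat < ((fp[nx.toNat]'hnx).take (fp.headD []).length).length := by
    simp only [List.length_take]; omega
  have htk : ((fp[nx.toNat]'hnx).take (fp.headD []).length)[ny.toNat]'hkk
      = (fp[nx.toNat]'hnx)[ny.toNat]'hny2 := List.getElem_take
  rw [← htk]
  exact List.getElem_mem _

def cnt (fp : List (List String)) (L : List (Int × Int)) (c : String) : Int :=
  (L.countP (fun p => cellAt fp p.1 p.2 == c) : Int)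

lemma countsDict_eq (fp : List (List String)) (L : List (Int × Int)) :
    countsDict fp L = ⟨[("W", cnt fp L "W"), ("P", cnt fp L "P"), ("S", cnt fp L "S"), ("C", cnt fp L "C")]⟩ := rfl

lemma cnt_snoc (fp : List (List String)) (L : List (Int × Int)) (q : Int × Int) (c : String) :
    cnt fp (L ++ [q]) c = cnt fp L c + (if cellAt fp q.1 q.2 == c then 1 else 0) := by
  unfold cnt
  rw [List.countP_append, List.countP_singleton]
  split_ifs with h <;> simp [h]

lemma countsDict_snoc_chair (fp : List (List String)) (L : List (Int × Int)) (q : Int × Int)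
    (hch : cellAt fp q.1 q.2 = "W" ∨ cellAt fp q.1 q.2 = "P" ∨ cellAt fp q.1 q.2 = "C" ∨ cellAt fp q.1 q.2 = "S") :
    (countsDict fp L).insert (cellAt fp q.1 q.2) ((countsDict fp L).getD (cellAt fp q.1 q.2) 0 + 1)
      = countsDict fp (L ++ [q]) := by
  rcases hch with hc | hc | hc | hc <;>
    (rw [hc, countsDict_eq, countsDict_eq]; simp [cnt_snoc, hc]; rfl)

lemma countsDict_snoc_not (fp : List (List String)) (L : List (Int × Int)) (q : Int × Int)
    (h : PySem.Str.isIn (cellAt fp q.1 q.2) "WPCS" = false) :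
    countsDict fp (L ++ [q]) = countsDict fp L := by
  have h4 : ∀ c, c ∈ (["W", "P", "S", "C"] : List String) → (cellAt fp q.1 q.2 == c) = false := by
    intro c hcmem
    rw [beq_eq_false_iff_ne]
    intro hEq
    rw [hEq] at h
    fin_cases hcmem <;> revert h <;> decide
  have hW := h4 "W" (by simp)
  have hP := h4 "P" (by simp)
  have hS := h4 "S" (by simp)
  have hC := h4 "C" (by simp)
  simp [countsDict, countsList, List.countP_append, List.countP_singleton]
  exact ⟨beq_eq_false_iff_ne.mp hW, beq_eq_false_iff_ne.mp hP, beq_eq_false_iff_ne.mp hS, beq_eq_false_iff_ne.mp hC⟩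

lemma foldA_spec (fp : List (List String)) (start : Int × Int) (V0 : List (Int × Int))
    (hlen : ∀ r ∈ fp, (fp.headD []).length ≤ r.length)
    (hbad : ∀ r ∈ fp, ∀ c ∈ r.take (fp.headD []).length, c ∉ (["", "WP", "PC", "CS", "WPC", "PCS", "WPCS"] : List String))
    (x y : Int) :
    ∀ (ds Q added : List (Int × Int)),
      (∀ d ∈ ds, d ∈ ([((0:Int),(1:Int)), (1,0), (0,-1), (-1,0)] : List (Int × Int))) →
      added.Nodup →
      (∀ a ∈ added, Reach fp start V0 a) →
      ((x, y) = start ∨ (x, y) ∈ added) →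
      ∃ new : List (Int × Int),
        ds.foldl (bfsStepA fp x y) (Q, countsDict fp added, V0 ++ added) =
          (Q ++ new, countsDict fp (added ++ new), V0 ++ (added ++ new)) ∧
        (added ++ new).Nodup ∧
        (∀ a ∈ added ++ new, Reach fp start V0 a) ∧
        (∀ d ∈ ds, Ok fp (x + d.1, y + d.2) → (x + d.1, y + d.2) ∉ V0 → (x + d.1, y + d.2) ∈ added ++ new) := by
  intro ds
  induction ds with
  | nil =>
    intro Q added _ hnd hre _
    exact ⟨[], by simp, by simpa using hnd, by simpa using hre, by simp⟩
  | cons d ds ih =>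
    intro Q added hds hnd hre hxy
    simp only [List.foldl_cons]
    by_cases hg : 0 ≤ x + d.1 ∧ x + d.1 < (fp.length : Int) ∧ 0 ≤ y + d.2 ∧ y + d.2 < ((fp.headD []).length : Int) ∧ (x + d.1, y + d.2) ∉ (V0 ++ added)
    · by_cases hc : PySem.Str.isIn (cellAt fp (x + d.1) (y + d.2)) " WPCS" = true
      · have hnotmem : (x + d.1, y + d.2) ∉ V0 ++ added := hg.2.2.2.2
        have hnV0 : (x + d.1, y + d.2) ∉ V0 := fun h => hnotmem (List.mem_append.mpr (Or.inl h))
        have hnadd : (x + d.1, y + d.2) ∉ added := fun h => hnotmem (List.mem_append.mpr (Or.inr h))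
        have hok : Ok fp (x + d.1, y + d.2) := ⟨hg.1, hg.2.1, hg.2.2.1, hg.2.2.2.1, hc⟩
        have hreach : Reach fp start V0 (x + d.1, y + d.2) := by
          have hadj : Adj (x, y) (x + d.1, y + d.2) := ⟨d, hds d (by simp), rfl⟩
          rcases hxy with h | h
          · exact Reach.base (h ▸ hadj) hok hnV0
          · exact Reach.step (hre _ h) hadj hok hnV0
        have hchairs : (if PySem.Str.isIn (cellAt fp (x + d.1) (y + d.2)) "WPCS" = true then
              (countsDict fp added).insert (cellAt fp (x + d.1) (y + d.2)) ((countsDict fp added).getD (cellAt fp (x + d.1) (y + d.2)) 0 + 1)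
            else countsDict fp added) = countsDict fp (added ++ [(x + d.1, y + d.2)]) := by
          split_ifs with h2
          · obtain ⟨r, hr, hcm⟩ := cellAt_mem_take fp (x + d.1) (y + d.2) hg.1 hg.2.1 hg.2.2.1 hg.2.2.2.1 hlen
            exact countsDict_snoc_chair fp added (x + d.1, y + d.2) (chair_cases _ h2 (hbad r hr _ hcm))
          · exact (countsDict_snoc_not fp added (x + d.1, y + d.2) (by simpa using h2)).symm
        have hstep : bfsStepA fp x y (Q, countsDict fp added, V0 ++ added) d =
            (Q ++ [(x + d.1, y + d.2)], countsDict fp (added ++ [(x + d.1, y + d.2)]),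
             V0 ++ (added ++ [(x + d.1, y + d.2)])) := by
          simp only [bfsStepA]
          rw [if_pos hg, if_pos hc, hchairs, PySem.Set.add_of_not_mem hnotmem, List.append_assoc]
        rw [hstep]
        have hnd1 : (added ++ [(x + d.1, y + d.2)]).Nodup := by
          simp [List.nodup_append, hnd]
          intro a b hab ha hb
          exact hnadd (by rw [← ha, ← hb]; exact hab)
        have hre1 : ∀ a ∈ added ++ [(x + d.1, y + d.2)], Reach fp start V0 a := by
          intro a ha
          rcases List.mem_append.mp ha with h | h
          · exact hre a h
          · rw [List.mem_singleton.mp h]; exact hreach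
        have hxy1 : (x, y) = start ∨ (x, y) ∈ added ++ [(x + d.1, y + d.2)] := by
          rcases hxy with h | h
          · exact Or.inl h
          · exact Or.inr (List.mem_append.mpr (Or.inl h))
        obtain ⟨new', heq, hnd', hre', hcov'⟩ :=
          ih (Q ++ [(x + d.1, y + d.2)]) (added ++ [(x + d.1, y + d.2)])
            (fun d0 hd0 => hds d0 (by simp [hd0])) hnd1 hre1 hxy1
        refine ⟨(x + d.1, y + d.2) :: new', ?_, ?_, ?_, ?_⟩
        · rw [heq]; simp
        · simpa [List.append_assoc] using hnd'
        · intro a ha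
          apply hre'
          simpa [List.append_assoc] using ha
        · intro d0 hd0 hok0 hnv0
          rcases List.mem_cons.mp hd0 with rfl | hd0
          · simp
          · have := hcov' d0 hd0 hok0 hnv0
            simpa [List.append_assoc] using this
      · have hstep : bfsStepA fp x y (Q, countsDict fp added, V0 ++ added) d = (Q, countsDict fp added, V0 ++ added) := by
          simp only [bfsStepA]
          rw [if_pos hg, if_neg hc]
        rw [hstep]
        obtain ⟨new, heq, hnd', hre', hcov'⟩ := ih Q added (fun d0 hd0 => hds d0 (by simp [hd0])) hnd hre hxy
        refine ⟨new, heq, hnd', hre', ?_⟩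
        intro d0 hd0 hok0 hnv0
        rcases List.mem_cons.mp hd0 with rfl | hd0
        · exact absurd hok0.2.2.2.2 hc
        · exact hcov' d0 hd0 hok0 hnv0
    · have hstep : bfsStepA fp x y (Q, countsDict fp added, V0 ++ added) d = (Q, countsDict fp added, V0 ++ added) := by
        simp only [bfsStepA]
        rw [if_neg hg]
      rw [hstep]
      obtain ⟨new, heq, hnd', hre', hcov'⟩ := ih Q added (fun d0 hd0 => hds d0 (by simp [hd0])) hnd hre hxy
      refine ⟨new, heq, hnd', hre', ?_⟩
      intro d0 hd0 hok0 hnv0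
      rcases List.mem_cons.mp hd0 with rfl | hd0
      · have hmem : (x + d0.1, y + d0.2) ∈ V0 ++ added := by
          by_contra hE
          exact hg ⟨hok0.1, hok0.2.1, hok0.2.2.1, hok0.2.2.2.1, hE⟩
        rcases List.mem_append.mp hmem with h | h
        · exact absurd h hnv0
        · exact List.mem_append.mpr (Or.inl h)
      · exact hcov' d0 hd0 hok0 hnv0

lemma loopA_spec (fp : List (List String)) (start : Int × Int) (V0 : List (Int × Int))
    (hlen : ∀ r ∈ fp, (fp.headD []).length ≤ r.length)
    (hbad : ∀ r ∈ fp, ∀ c ∈ r.take (fp.headD []).length, c ∉ (["", "WP", "PC", "CS", "WPC", "PCS", "WPCS"] : List String)) :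
    ∀ (n : Nat) (Q added : List (Int × Int)),
      freeCount (fp.length : Int) ((fp.headD []).length : Int) (V0 ++ added) + Q.length = n →
      added.Nodup →
      (∀ a ∈ added, Reach fp start V0 a) →
      (∀ p ∈ Q, p = start ∨ p ∈ added) →
      (∀ p, (p = start ∨ p ∈ added) → p ∉ Q → ∀ q, Adj p q → Ok fp q → q ∉ V0 → q ∈ added) →
      ∃ addedF,
        bfsLoopA fp Q (countsDict fp added) (V0 ++ added) = (countsDict fp addedF, V0 ++ addedF) ∧
        addedF.Nodup ∧
        (∀ a ∈ addedF, Reach fp start V0 a) ∧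
        (∀ p, (p = start ∨ p ∈ addedF) → ∀ q, Adj p q → Ok fp q → q ∉ V0 → q ∈ addedF) := by
  intro n
  induction n using Nat.strong_induction_on with
  | _ n ihn =>
    intro Q added hn hnd hre hQ hcl
    cases Q with
    | nil =>
      refine ⟨added, ?_, hnd, hre, fun p hp => hcl p hp (by simp)⟩
      rw [bfsLoopA]
    | cons hd rest =>
      obtain ⟨x, y⟩ := hd
      obtain ⟨new, heq, hnd2, hre2, hcov⟩ :=
        foldA_spec fp start V0 hlen hbad x y [((0:Int),(1:Int)), (1,0), (0,-1), (-1,0)] rest added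
          (fun d hd => hd) hnd hre (hQ (x, y) (by simp))
      have hmeas := foldA_measure fp x y [((0:Int),(1:Int)), (1,0), (0,-1), (-1,0)] rest (countsDict fp added) (V0 ++ added)
      rw [heq] at hmeas
      simp only [List.length_append] at hmeas
      have hlt : freeCount (fp.length : Int) ((fp.headD []).length : Int) (V0 ++ (added ++ new)) + (rest ++ new).length < n := by
        simp only [List.length_append]
        simp only [List.length_cons] at hn
        omega
      have hQ' : ∀ p ∈ rest ++ new, p = start ∨ p ∈ added ++ new := by
        intro p hp
        rcases List.mem_append.mp hp with h | h
        · rcases hQ p (by simp [h]) with h2 | h2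
          · exact Or.inl h2
          · exact Or.inr (List.mem_append.mpr (Or.inl h2))
        · exact Or.inr (List.mem_append.mpr (Or.inr h))
      have hcl' : ∀ p, (p = start ∨ p ∈ added ++ new) → p ∉ rest ++ new →
          ∀ q, Adj p q → Ok fp q → q ∉ V0 → q ∈ added ++ new := by
        intro p hp hnp q hadj hok hnv0
        by_cases hpxy : p = (x, y)
        · subst hpxy
          obtain ⟨d, hd, rfl⟩ := hadj
          exact hcov d hd hok hnv0
        · have hp2 : p = start ∨ p ∈ added := by
            rcases hp with h | h
            · exact Or.inl h
            · rcases List.mem_append.mp h with h2 | h2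
              · exact Or.inr h2
              · exact absurd (List.mem_append.mpr (Or.inr h2)) hnp
          have hnpq : p ∉ (x, y) :: rest := by
            intro hmem
            rcases List.mem_cons.mp hmem with h2 | h2
            · exact hpxy h2
            · exact hnp (List.mem_append.mpr (Or.inl h2))
          exact List.mem_append.mpr (Or.inl (hcl p hp2 hnpq q hadj hok hnv0))
      obtain ⟨addedF, heqF, hndF, hreF, hclF⟩ :=
        ihn _ hlt (rest ++ new) (added ++ new) rfl hnd2 hre2 hQ' hcl'
      refine ⟨addedF, ?_, hndF, hreF, hclF⟩
      rw [bfsLoopA]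
      rw [heq]
      exact heqF

lemma added_eq_reach (fp : List (List String)) (start : Int × Int) (V0 added : List (Int × Int))
    (hre : ∀ a ∈ added, Reach fp start V0 a)
    (hcl : ∀ p, (p = start ∨ p ∈ added) → ∀ q, Adj p q → Ok fp q → q ∉ V0 → q ∈ added)
    (a : Int × Int) : a ∈ added ↔ Reach fp start V0 a := by
  constructor
  · exact hre a
  · intro h
    induction h with
    | base hadj hok hnv => exact hcl start (Or.inl rfl) _ hadj hok hnv
    | step hp hadj hok hnv ih => exact hcl _ (Or.inr ih) _ hadj hok hnv

-- ===== B-side lemmas =====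

lemma mem_cellsB (fp : List (List String)) (V0 : List (Int × Int)) (rows cols : Int)
    (p : Int × Int) :
    p ∈ cellsB fp V0 rows cols ↔
      0 ≤ p.1 ∧ p.1 < rows ∧ 0 ≤ p.2 ∧ p.2 < cols ∧ p ∉ V0 ∧
      PySem.Str.isIn (cellAt fp p.1 p.2) " WPCS" = true := by
  obtain ⟨i, j⟩ := p
  simp only [cellsB, List.mem_flatMap, List.mem_map, List.mem_filter,
    PySem.List.mem_pyRange_one, Bool.and_eq_true, decide_eq_true_eq]
  constructor
  · rintro ⟨a, ha, b, ⟨hb, hnb, hcb⟩, hEq⟩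
    obtain ⟨rfl, rfl⟩ := Prod.mk.injEq .. ▸ hEq
    exact ⟨ha.1, ha.2, hb.1, hb.2, hnb, hcb⟩
  · rintro ⟨h1, h2, h3, h4, h5, h6⟩
    exact ⟨i, ⟨h1, h2⟩, j, ⟨⟨h3, h4⟩, h5, h6⟩, rfl⟩

-- the offset list is symmetric: a cell is a neighbour of its neighbour
lemma nbr_back (d : Int × Int) (hd : d ∈ dirs4) (p : Int × Int) :
    ∃ e ∈ dirs4, ((p.1 + d.1) + e.1, (p.2 + d.2) + e.2) = p := by
  fin_cases hd
  · exact ⟨(0, -1), by simp [dirs4], by simp⟩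
  · exact ⟨(-1, 0), by simp [dirs4], by simp⟩
  · exact ⟨(0, 1), by simp [dirs4], by simp⟩
  · exact ⟨(1, 0), by simp [dirs4], by simp⟩

lemma adj_of_nbr (d : Int × Int) (hd : d ∈ dirs4) (p : Int × Int) :
    Adj (p.1 + d.1, p.2 + d.2) p := by
  obtain ⟨e, he, hEq⟩ := nbr_back d hd p
  exact ⟨e, by simpa [dirs4] using he, hEq.symm⟩

lemma mem_growB (start : Int × Int) (cells region : List (Int × Int)) (q : Int × Int) :
    q ∈ growB start cells region ↔
      q ∈ cells ∧ q ∉ region ∧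
      ∃ d ∈ dirs4, (q.1 + d.1, q.2 + d.2) = start ∨ (q.1 + d.1, q.2 + d.2) ∈ region := by
  simp only [growB, List.mem_filter, Bool.and_eq_true, decide_eq_true_eq,
    List.any_eq_true, Bool.or_eq_true, beq_iff_eq]

lemma satB_spec (fp : List (List String)) (start : Int × Int) (V0 cells : List (Int × Int))
    (hcells : ∀ q ∈ cells, Ok fp q ∧ q ∉ V0) :
    ∀ (n : Nat) (region : List (Int × Int)),
      cells.countP (fun p => decide (p ∉ region)) = n →
      region.Nodup →
      (∀ a ∈ region, Reach fp start V0 a) →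
      (satB start cells region).Nodup ∧
      (∀ a ∈ satB start cells region, Reach fp start V0 a) ∧
      growB start cells (satB start cells region) = [] := by
  intro n
  induction n using Nat.strong_induction_on with
  | _ n ihn =>
    intro region hn hnd hre
    rw [satB]
    by_cases hg : growB start cells region = []
    · simp only [hg, if_pos rfl]
      exact ⟨hnd, hre, hg⟩
    · simp only [if_neg hg]
      have hlt := satB_dec start cells region hg
      have hnd' : (PySem.Set.update region (growB start cells region)).Nodup :=
        PySem.Set.nodup_update _ _ hnd
      have hre' : ∀ a ∈ PySem.Set.update region (growB start cells region), Reach fp start V0 a := by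
        intro a ha
        rcases (PySem.Set.mem_update _ _ _).mp ha with h | h
        · exact hre a h
        · obtain ⟨hc, _, d, hd, hor⟩ := (mem_growB start cells region a).mp h
          obtain ⟨hok, hnv0⟩ := hcells a hc
          have hadj : Adj (a.1 + d.1, a.2 + d.2) a := adj_of_nbr d hd a
          rcases hor with h2 | h2
          · exact Reach.base (h2 ▸ hadj) hok hnv0
          · exact Reach.step (hre _ h2) hadj hok hnv0
      exact ihn _ (hn ▸ hlt) _ rfl hnd' hre'

-- at the fixpoint the region is closed under the step relation
lemma satB_closed (fp : List (List String)) (start : Int × Int) (V0 cells R : List (Int × Int))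
    (hcells2 : ∀ q, Ok fp q → q ∉ V0 → q ∈ cells)
    (hfix : growB start cells R = []) :
    ∀ p, (p = start ∨ p ∈ R) → ∀ q, Adj p q → Ok fp q → q ∉ V0 → q ∈ R := by
  intro p hp q hadj hok hnv0
  by_contra hqR
  obtain ⟨e, he, rfl⟩ := hadj
  obtain ⟨d, hd, hback⟩ := nbr_back e (by simpa [dirs4] using he) p
  have : (p.1 + e.1, p.2 + e.2) ∈ growB start cells R := by
    rw [mem_growB]
    refine ⟨hcells2 _ hok hnv0, hqR, d, hd, ?_⟩
    rw [hback]
    tauto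
  rw [hfix] at this
  simp at this

-- ===== VERDICT (by name: the statement is the Claim_ definition above) =====
theorem bfs_spec : Claim_equal_bfs := by
  intro start fp visited hdom hpre
  obtain ⟨hlen, hbad⟩ := hpre
  obtain ⟨addedA, heqA, hndA, hreA, hclA⟩ :=
    loopA_spec fp start visited hlen hbad
      (freeCount (fp.length : Int) ((fp.headD []).length : Int) (visited ++ []) + 1)
      [start] [] (by simp) (by simp) (by simp) (by simp)
      (by intro p hp hnp; rcases hp with h | h
          · exact absurd (by simp [h]) hnp
          · simp at h)
  have hcols : (if fp.isEmpty then (0:Int) else ((fp.headD []).length : Int)) = ((fp.headD []).length : Int) := by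
    cases fp <;> simp
  have hcells : ∀ q ∈ cellsB fp visited (fp.length : Int) ((fp.headD []).length : Int),
      Ok fp q ∧ q ∉ visited := by
    intro q hq
    obtain ⟨h1, h2, h3, h4, h5, h6⟩ := (mem_cellsB fp visited _ _ q).mp hq
    exact ⟨⟨h1, h2, h3, h4, h6⟩, h5⟩
  have hcells2 : ∀ q, Ok fp q → q ∉ visited →
      q ∈ cellsB fp visited (fp.length : Int) ((fp.headD []).length : Int) := by
    intro q hok hnv
    exact (mem_cellsB fp visited _ _ q).mpr ⟨hok.1, hok.2.1, hok.2.2.1, hok.2.2.2.1, hnv, hok.2.2.2.2⟩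
  obtain ⟨hndB, hreB, hfix⟩ :=
    satB_spec fp start visited (cellsB fp visited (fp.length : Int) ((fp.headD []).length : Int))
      hcells _ [] rfl (by simp) (by simp)
  have hclB := satB_closed fp start visited _ _ hcells2 hfix
  have hperm : addedA.Perm (satB start (cellsB fp visited (fp.length : Int) ((fp.headD []).length : Int)) []) := by
    refine (List.perm_ext_iff_of_nodup hndA hndB).mpr ?_
    intro a
    rw [added_eq_reach fp start visited addedA hreA hclA a,
        added_eq_reach fp start visited _ hreB hclB a]
  simp only [List.append_nil] at heqA
  show bfs start fp visited = bfs_alt start fp visited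
  unfold bfs bfs_alt
  dsimp only
  rw [hcols]
  have hinit : PySem.Dict.ofList [("W", (0:Int)), ("P", 0), ("S", 0), ("C", 0)] = countsDict fp [] := rfl
  rw [hinit, heqA]
  show countsList fp addedA = _
  simp [countsList, hperm.countP_eq]
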